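-- pv_equiv track=rewrite | github.com/Key-man-fromArchive/skipalign | src/skipalign/primer.py | _cap_degeneracy
-- ===== SOURCE A (Python) =====
-- IUPAC_EXPAND = {
--     "A": "A", "C": "C", "G": "G", "T": "T",
--     "R": "AG", "Y": "CT", "S": "GC", "W": "AT",
--     "K": "GT", "M": "AC", "B": "CGT", "D": "AGT",
--     "H": "ACT", "V": "ACG", "N": "ACGT",
-- }
--
-- MAX_DEGENERACY = 100
--
-- def degeneracy(seq: str) -> int:
--     """Calculate total degeneracy of an IUPAC sequence."""
--     result = 1
--     for base in seq.upper():
--         result *= len(IUPAC_EXPAND.get(base, base))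
--     return result
--
-- def _cap_degeneracy(seq: str, max_deg: int = MAX_DEGENERACY) -> str:
--     """Reduce degeneracy by replacing ambiguous bases with majority base if over cap."""
--     if degeneracy(seq) <= max_deg:
--         return seq
--     # Greedily replace most-degenerate positions with first base
--     result = list(seq)
--     while degeneracy("".join(result)) > max_deg:
--         # Find position with highest individual degeneracy
--         worst_idx = max(
--             range(len(result)),
--             key=lambda i: len(IUPAC_EXPAND.get(result[i].upper(), result[i])),
--         )
--         expanded = IUPAC_EXPAND.get(result[worst_idx].upper(), result[worst_idx])
--         result[worst_idx] = expanded[0]  # replace with first base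
--     return "".join(result)
-- ===== SOURCE B (Python) =====
-- IUPAC_EXPAND = {
--     "A": "A", "C": "C", "G": "G", "T": "T",
--     "R": "AG", "Y": "CT", "S": "GC", "W": "AT",
--     "K": "GT", "M": "AC", "B": "CGT", "D": "AGT",
--     "H": "ACT", "V": "ACG", "N": "ACGT",
-- }
--
-- MAX_DEGENERACY = 100
--
--
-- def _deg(c):
--     return len(IUPAC_EXPAND.get(c.upper(), c))
--
--
-- def _rep(c):
--     return IUPAC_EXPAND.get(c.upper(), c)[0]
--
--
-- def _cap_degeneracy(seq: str, max_deg: int = MAX_DEGENERACY) -> str: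
--     degs = [_deg(c) for c in seq]
--     # products are clamped at bound (> max_deg): exact wherever a <= max_deg test can succeed
--     bound = max(max_deg, 1) + 1
--     total = 1
--     for d in degs:
--         total = min(total * d, bound)
--     if total <= max_deg:
--         return seq
--     # counting-sort flavour: per-base degeneracy is in {1,2,3,4}, so the positions
--     # ordered by (-degeneracy, index) are just three bucket scans
--     order = [i for d in (4, 3, 2) for i, di in enumerate(degs) if di == d]
--     # suffix[k] = (clamped) degeneracy left once the first k ordered positions are replaced
--     suffix = [1]
--     for i in reversed(order):
--         suffix.append(min(suffix[-1] * degs[i], bound))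
--     suffix.reverse()
--     result = list(seq)
--     for i, s in zip(order, suffix):
--         if s <= max_deg:
--             break
--         result[i] = _rep(seq[i])
--     return "".join(result)
-- ===== Notes on version B (the rewrite author's own statement) =====
-- stated objective: alternative
-- what changed: A recomputes the whole-string degeneracy and rescans for the argmax position on every replacement; B exploits that per-base degeneracy is in {1,2,3,4}: it builds the (-degeneracy, index) order with three bucket scans (a counting sort), precomputes cap-clamped suffix products of the remaining degeneracy, and does a single pass replacing until the remainder is under the cap.
import Mathlib
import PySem

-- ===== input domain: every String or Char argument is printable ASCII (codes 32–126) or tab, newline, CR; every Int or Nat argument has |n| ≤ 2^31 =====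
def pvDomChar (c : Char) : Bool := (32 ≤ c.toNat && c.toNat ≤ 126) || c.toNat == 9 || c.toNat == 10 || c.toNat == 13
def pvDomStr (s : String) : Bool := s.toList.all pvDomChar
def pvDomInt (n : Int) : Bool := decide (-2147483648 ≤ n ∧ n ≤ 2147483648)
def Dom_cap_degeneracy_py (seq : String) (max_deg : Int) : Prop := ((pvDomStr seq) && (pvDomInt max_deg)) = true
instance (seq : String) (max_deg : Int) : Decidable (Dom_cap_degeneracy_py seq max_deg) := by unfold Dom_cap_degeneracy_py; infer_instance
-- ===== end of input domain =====

-- B replaces A's per-replacement rescans (recomputed degeneracy + argmax) by one bucket-ordered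
-- pass (per-base degeneracy is in {1,2,3,4}) driven by cap-clamped suffix products.

-- ===== PORT A =====
-- the module constant IUPAC_EXPAND (shared by both Python files)
def pvIupac : PySem.Dict String String :=
  PySem.Dict.ofList [("A","A"),("C","C"),("G","G"),("T","T"),("R","AG"),("Y","CT"),("S","GC"),("W","AT"),("K","GT"),("M","AC"),("B","CGT"),("D","AGT"),("H","ACT"),("V","ACG"),("N","ACGT")]

-- degeneracy(seq): result = 1; for base in seq.upper(): result *= len(IUPAC_EXPAND.get(base, base))
def pvDegeneracy (s : String) : Int :=
  (PySem.Str.upper s).toList.foldl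
    (fun r b => r * PySem.Str.len (PySem.Dict.getD pvIupac (String.ofList [b]) (String.ofList [b]))) 1

-- the key of max(...): len(IUPAC_EXPAND.get(result[i].upper(), result[i]))
def pvKeyAt (res : List Char) (i : Nat) : Int :=
  PySem.Str.len (PySem.Dict.getD pvIupac (PySem.Str.upper (String.ofList [res.getD i ' '])) (String.ofList [res.getD i ' ']))

-- max(range(len(result)), key=...): first index attaining the maximum; none = ValueError on an empty range
def pvWorst (res : List Char) : Option Nat :=
  if res.length = 0 then none
  else some ((List.range res.length).foldl (fun best i => if pvKeyAt res best < pvKeyAt res i then i else best) 0)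

-- the while loop; fuel ≥ number of iterations under Pre_ (each iteration replaces one position)
def pvLoopA (max_deg : Int) : Nat → List Char → List Char
  | 0, res => res
  | Nat.succ fuel, res =>
    if pvDegeneracy (String.ofList res) ≤ max_deg then res
    else
      match pvWorst res with
      | none => res  -- Python raises ValueError here; outside Pre_
      | some idx =>
        let c := res.getD idx ' '
        let expanded := PySem.Dict.getD pvIupac (PySem.Str.upper (String.ofList [c])) (String.ofList [c])
        pvLoopA max_deg fuel (res.set idx (expanded.toList.headD c))  -- expanded[0]; expanded ≠ "" whenever reached

def cap_degeneracy_py (seq : String) (max_deg : Int) : String :=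
  if pvDegeneracy seq ≤ max_deg then seq
  else String.ofList (pvLoopA max_deg (seq.toList.length + 1) seq.toList)

-- ===== PORT B =====
-- _deg/_rep share the expression IUPAC_EXPAND.get(c.upper(), c)
def pvExpandB (c : Char) : String :=
  PySem.Dict.getD pvIupac (PySem.Str.upper (String.ofList [c])) (String.ofList [c])

def pvDegB (c : Char) : Int := PySem.Str.len (pvExpandB c)

def pvRepB (c : Char) : Char := (pvExpandB c).toList.headD c  -- [0]; nonempty whenever reached

-- order = [i for d in (4, 3, 2) for i, di in enumerate(degs) if di == d]
def pvOrder (degs : List Int) : List Nat :=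
  [(4 : Int), 3, 2].flatMap (fun d =>
    ((PySem.List.enumerate degs).filter (fun p => p.2 == d)).map (fun p => p.1.toNat))

-- suffix[k] = (clamped) degeneracy left once the first k ordered positions are replaced,
-- built back to front (the foldr is the reversed append loop of Source B)
def pvSuffix (degs : List Int) (bound : Int) (order : List Nat) : List Int :=
  order.foldr (fun i acc => min (acc.headD 1 * degs.getD i 1) bound :: acc) [1]

-- for i, s in zip(order, suffix): if s <= max_deg: break; result[i] = _rep(seq[i])
def pvLoopB (degs : List Int) (seq : List Char) (max_deg : Int) : List Nat → List Int → List Char → List Char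
  | [], _, res => res
  | _ :: _, [], res => res
  | i :: rest, s :: srest, res =>
    if s ≤ max_deg then res
    else pvLoopB degs seq max_deg rest srest (res.set i (pvRepB (seq.getD i ' ')))

def cap_degeneracy_py_alt (seq : String) (max_deg : Int) : String :=
  let degs := seq.toList.map pvDegB
  let bound := max max_deg 1 + 1
  let total := degs.foldl (fun t d => min (t * d) bound) 1
  if total ≤ max_deg then seq
  else
    let order := pvOrder degs
    String.ofList (pvLoopB degs seq.toList max_deg order (pvSuffix degs bound order) seq.toList)

-- ===== PRECONDITION & SPEC =====
-- Pre_ excludes max_deg < 1, where A never returns: total degeneracy is always ≥ 1, so A raises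
-- ValueError (empty seq) or loops forever (non-empty seq).
def Pre_cap_degeneracy_py (seq : String) (max_deg : Int) : Prop := 1 ≤ max_deg
instance (seq : String) (max_deg : Int) : Decidable (Pre_cap_degeneracy_py seq max_deg) := by unfold Pre_cap_degeneracy_py; infer_instance

def pvWitness_cap_degeneracy_py : String × Int := ("ANNN", 10)

def Spec_cap_degeneracy_py (seq : String) (max_deg : Int) (out : String) : Prop := out = cap_degeneracy_py_alt seq max_deg
instance (seq : String) (max_deg : Int) (out : String) : Decidable (Spec_cap_degeneracy_py seq max_deg out) := by unfold Spec_cap_degeneracy_py; infer_instance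

-- ===== CLAIM (what is proved, stated in full; the proofs are below) =====
def Claim_equal_cap_degeneracy_py : Prop := ∀ (seq : String) (max_deg : Int), Dom_cap_degeneracy_py seq max_deg → Pre_cap_degeneracy_py seq max_deg → Spec_cap_degeneracy_py seq max_deg (cap_degeneracy_py seq max_deg)

-- ===== LEMMAS AND PROOFS =====

-- the per-character degeneracy, as a Nat
def dN (c : Char) : Nat := (pvExpandB c).toList.length

-- the result list after the first k replacements of the bucket order
def applyRep (l : List Char) (S : List Nat) : List Char :=
  S.foldl (fun r i => r.set i (pvRepB (l.getD i ' '))) l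

def ordL (l : List Char) : List Nat := pvOrder (l.map pvDegB)

def prodN (res : List Char) : Nat := (res.map dN).prod

-- one bucket of pvOrder
def bktB (degs : List Int) (d : Int) : List Nat :=
  ((PySem.List.enumerate degs).filter (fun p => p.2 == d)).map (fun p => p.1.toNat)

-- the fold inside pvWorst
def amax (κ : Nat → Int) (n : Nat) : Nat :=
  (List.range n).foldl (fun best i => if κ best < κ i then i else best) 0

theorem upper_single (c : Char) :
    PySem.Str.upper (String.ofList [c]) = String.ofList [PySem.Chars.upperChar c] := by
  simp [PySem.Str.upper, PySem.Chars.upper, String.toList_ofList]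

set_option maxHeartbeats 1600000 in
theorem expand_spec (c : Char) : 1 ≤ dN c ∧ dN c ≤ 4 ∧ (2 ≤ dN c → dN (pvRepB c) = 1) := by
  cases h : pvIupac.get? (PySem.Str.upper (String.ofList [c])) with
  | none =>
    have e : pvExpandB c = String.ofList [c] := by
      unfold pvExpandB
      rw [PySem.Dict.getD_eq_get?_getD, h]
      rfl
    refine ⟨?_, ?_, ?_⟩ <;> simp [dN, e, String.toList_ofList]
  | some v =>
    have e : pvExpandB c = v := by
      unfold pvExpandB
      rw [PySem.Dict.getD_eq_get?_getD, h]
      rfl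
    obtain ⟨p, hpmem, hpv⟩ : ∃ p ∈ pvIupac.items, p.2 = v := by
      have h' := h
      unfold PySem.Dict.get? at h'
      obtain ⟨p, hfind⟩ : ∃ p, List.find? (fun p => p.1 == PySem.Str.upper (String.ofList [c])) pvIupac.items = some p := by
        cases hf : List.find? (fun p => p.1 == PySem.Str.upper (String.ofList [c])) pvIupac.items with
        | none => rw [hf] at h'; simp at h'
        | some p => exact ⟨p, rfl⟩
      rw [hfind] at h'
      simp only [Option.map_some, Option.some.injEq] at h'
      exact ⟨p, List.mem_of_find?_eq_some hfind, h'⟩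
    have hmem : p ∈ ([("A","A"),("C","C"),("G","G"),("T","T"),("R","AG"),("Y","CT"),("S","GC"),("W","AT"),("K","GT"),("M","AC"),("B","CGT"),("D","AGT"),("H","ACT"),("V","ACG"),("N","ACGT")] : List (String × String)) := hpmem
    subst hpv
    fin_cases hmem <;> simp only [dN, pvRepB, e] <;>
      exact ⟨by decide, by decide, fun _ => by
        first
          | rw [show ("A".toList.headD c) = 'A' from rfl]
          | rw [show ("C".toList.headD c) = 'C' from rfl]
          | rw [show ("G".toList.headD c) = 'G' from rfl]
          | rw [show ("T".toList.headD c) = 'T' from rfl]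
          | rw [show ("AG".toList.headD c) = 'A' from rfl]
          | rw [show ("CT".toList.headD c) = 'C' from rfl]
          | rw [show ("GC".toList.headD c) = 'G' from rfl]
          | rw [show ("AT".toList.headD c) = 'A' from rfl]
          | rw [show ("GT".toList.headD c) = 'G' from rfl]
          | rw [show ("AC".toList.headD c) = 'A' from rfl]
          | rw [show ("CGT".toList.headD c) = 'C' from rfl]
          | rw [show ("AGT".toList.headD c) = 'A' from rfl]
          | rw [show ("ACT".toList.headD c) = 'A' from rfl]
          | rw [show ("ACG".toList.headD c) = 'A' from rfl]
          | rw [show ("ACGT".toList.headD c) = 'A' from rfl]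
        decide⟩

theorem dN_pos (c : Char) : 1 ≤ dN c := (expand_spec c).1
theorem dN_le4 (c : Char) : dN c ≤ 4 := (expand_spec c).2.1
theorem dN_rep (c : Char) (h : 2 ≤ dN c) : dN (pvRepB c) = 1 := (expand_spec c).2.2 h

theorem pvDegB_eq (c : Char) : pvDegB c = (dN c : Int) := rfl

theorem pvKeyAt_eq (res : List Char) (i : Nat) : pvKeyAt res i = (dN (res.getD i ' ') : Int) := rfl

theorem degA_char (c : Char) :
    PySem.Str.len (PySem.Dict.getD pvIupac (String.ofList [PySem.Chars.upperChar c])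
      (String.ofList [PySem.Chars.upperChar c])) = (dN c : Int) := by
  unfold dN pvExpandB
  rw [upper_single, PySem.Dict.getD_eq_get?_getD, PySem.Dict.getD_eq_get?_getD]
  cases h : pvIupac.get? (String.ofList [PySem.Chars.upperChar c]) with
  | none => simp [PySem.Str.len, String.toList_ofList]
  | some v => simp [PySem.Str.len]

theorem foldl_mul_map {α : Type} (f : α → Int) (l : List α) (init : Int) :
    l.foldl (fun r b => r * f b) init = init * (l.map f).prod := by
  induction l generalizing init with
  | nil => simp
  | cons x xs ih => simp [List.foldl_cons, ih, mul_assoc]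

theorem pvDegeneracy_eq (res : List Char) :
    pvDegeneracy (String.ofList res) = ((prodN res : Nat) : Int) := by
  unfold pvDegeneracy prodN
  rw [show (PySem.Str.upper (String.ofList res)).toList = res.map PySem.Chars.upperChar by
        simp [PySem.Str.toList_upper, String.toList_ofList, PySem.Chars.upper]]
  rw [foldl_mul_map (fun b => PySem.Str.len (PySem.Dict.getD pvIupac (String.ofList [b]) (String.ofList [b])))
        (res.map PySem.Chars.upperChar) 1, one_mul, List.map_map, Nat.cast_list_prod, List.map_map]
  exact congrArg List.prod (List.map_congr_left fun c _ => degA_char c)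

theorem getD_degs (l : List Char) (j : Nat) (hj : j < l.length) :
    (l.map pvDegB).getD j 1 = (dN (l.getD j ' ') : Int) := by
  have hj' : j < (l.map pvDegB).length := by
    rw [List.length_map]; exact hj
  rw [List.getD_eq_getElem _ 1 hj', List.getElem_map, pvDegB_eq, List.getD_eq_getElem l ' ' hj]

-- the degeneracy that is left when exactly the positions of `ord` are still unreplaced
def sfxProd (l : List Char) (ord : List Nat) : Nat :=
  (ord.map (fun i => dN (l.getD i ' '))).prod

theorem clamp_total_go (l : List Char) (bound : Int) (hb : 1 ≤ bound) :
    ∀ t : Int, 1 ≤ t →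
      (l.map pvDegB).foldl (fun t d => min (t * d) bound) (min t bound)
        = min (t * ((prodN l : Nat) : Int)) bound := by
  induction l with
  | nil => intro t ht; simp [prodN]
  | cons c l ih =>
    intro t ht
    have hd : (1 : Int) ≤ pvDegB c := by
      rw [pvDegB_eq]
      exact_mod_cast dN_pos c
    have hstep : min (min t bound * pvDegB c) bound = min (t * pvDegB c) bound := by
      rcases le_or_gt t bound with h | h
      · rw [min_eq_left h]
      · rw [min_eq_right (le_of_lt h)]
        have h1 : bound ≤ bound * pvDegB c := le_mul_of_one_le_right (by omega) hd
        have h2 : t ≤ t * pvDegB c := le_mul_of_one_le_right (by omega) hd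
        omega
    rw [List.map_cons, List.foldl_cons, hstep,
        ih (t * pvDegB c) (one_le_mul_of_one_le_of_one_le ht hd)]
    have : t * pvDegB c * ((prodN l : Nat) : Int) = t * ((prodN (c :: l) : Nat) : Int) := by
      rw [pvDegB_eq]
      unfold prodN
      push_cast [List.map_cons, List.prod_cons]
      ring
    rw [this]

theorem clamp_total_eq (l : List Char) (bound : Int) (hb : 1 ≤ bound) :
    (l.map pvDegB).foldl (fun t d => min (t * d) bound) 1
      = min (((prodN l : Nat) : Int)) bound := by
  have h1 : (1 : Int) = min 1 bound := by omega
  rw [h1, clamp_total_go l bound hb 1 (by omega), one_mul]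

theorem sfxProd_cons (l : List Char) (j : Nat) (rest : List Nat) :
    (sfxProd l (j :: rest) : Int) = (dN (l.getD j ' ') : Int) * (sfxProd l rest : Int) := by
  unfold sfxProd
  push_cast [List.map_cons, List.prod_cons]
  ring

theorem pvSuffix_cons (degs : List Int) (bound : Int) (j : Nat) (rest : List Nat) :
    pvSuffix degs bound (j :: rest) =
      min ((pvSuffix degs bound rest).headD 1 * degs.getD j 1) bound :: pvSuffix degs bound rest := rfl

theorem one_le_sfxProd (l : List Char) (ord : List Nat) : 1 ≤ sfxProd l ord := by
  unfold sfxProd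
  induction ord with
  | nil => simp
  | cons j rest ih =>
    rw [List.map_cons, List.prod_cons]
    have := dN_pos (l.getD j ' ')
    simpa using Nat.mul_le_mul this ih

theorem head_pvSuffix (l : List Char) (bound : Int) (hb : 1 ≤ bound) :
    ∀ ord : List Nat, (∀ i ∈ ord, i < l.length) →
      (pvSuffix (l.map pvDegB) bound ord).headD 1 = min ((sfxProd l ord : Nat) : Int) bound := by
  intro ord
  induction ord with
  | nil => intro _; simp [pvSuffix, sfxProd]; omega
  | cons j rest ih =>
    intro hmem
    have hj : j < l.length := hmem j (by simp)
    have hrest : ∀ i ∈ rest, i < l.length := fun i hi => hmem i (by simp [hi])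
    rw [pvSuffix_cons, List.headD_cons, ih hrest, getD_degs l j hj]
    have hs1 : (1 : Int) ≤ ((sfxProd l rest : Nat) : Int) := by exact_mod_cast one_le_sfxProd l rest
    have hd1 : (1 : Int) ≤ (dN (l.getD j ' ') : Int) := by exact_mod_cast dN_pos _
    have harith : min (min ((sfxProd l rest : Nat) : Int) bound * (dN (l.getD j ' ') : Int)) bound
        = min (((sfxProd l rest : Nat) : Int) * (dN (l.getD j ' ') : Int)) bound := by
      rcases le_or_gt ((sfxProd l rest : Nat) : Int) bound with h | h
      · rw [min_eq_left h]
      · rw [min_eq_right (le_of_lt h)]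
        have h1 : bound ≤ bound * (dN (l.getD j ' ') : Int) := le_mul_of_one_le_right (by omega) hd1
        have h2 : ((sfxProd l rest : Nat) : Int) ≤ ((sfxProd l rest : Nat) : Int) * (dN (l.getD j ' ') : Int) :=
          le_mul_of_one_le_right (by omega) hd1
        omega
    rw [harith, sfxProd_cons, mul_comm]

theorem length_foldl_set (S : List Nat) (r : List Char) (f : Nat → Char) :
    (S.foldl (fun r i => r.set i (f i)) r).length = r.length := by
  induction S generalizing r with
  | nil => rfl
  | cons x xs ih => simp [List.foldl_cons, ih, List.length_set]

theorem length_applyRep (l : List Char) (S : List Nat) : (applyRep l S).length = l.length :=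
  length_foldl_set S l _

theorem getD_foldl_set (S : List Nat) (r : List Char) (f : Nat → Char) (i : Nat)
    (hnd : S.Nodup) (hi : i < r.length) :
    (S.foldl (fun r j => r.set j (f j)) r).getD i ' ' =
      if i ∈ S then f i else r.getD i ' ' := by
  induction S generalizing r with
  | nil => simp
  | cons x xs ih =>
    simp only [List.foldl_cons, List.mem_cons]
    rw [ih (r.set x (f x)) (List.nodup_cons.mp hnd).2 (by simpa using hi)]
    by_cases hx : i = x
    · subst hx
      have : i ∉ xs := (List.nodup_cons.mp hnd).1
      simp [this, List.getD_eq_getElem?_getD, hi]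
    · by_cases hmem : i ∈ xs <;>
        simp [hx, hmem, List.getD_eq_getElem?_getD, List.getElem?_set_ne (fun h => hx h.symm)]

theorem getD_applyRep (l : List Char) (S : List Nat) (hnd : S.Nodup) (i : Nat) (hi : i < l.length) :
    (applyRep l S).getD i ' ' = if i ∈ S then pvRepB (l.getD i ' ') else l.getD i ' ' :=
  getD_foldl_set S l (fun j => pvRepB (l.getD j ' ')) i hnd hi

-- bucket facts
theorem mem_bucket (degs : List Int) (d : Int) (i : Nat) :
    i ∈ bktB degs d ↔ ∃ h : i < degs.length, degs[i] = d := by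
  unfold bktB
  constructor
  · intro h
    simp only [List.mem_map, List.mem_filter, PySem.List.mem_enumerate_iff] at h
    obtain ⟨p, ⟨⟨k, hk, rfl⟩, hd⟩, hi⟩ := h
    simp only [beq_iff_eq] at hd
    have hik : i = k := by simpa using hi.symm
    subst hik
    exact ⟨hk, hd⟩
  · rintro ⟨h, hd⟩
    simp only [List.mem_map, List.mem_filter, PySem.List.mem_enumerate_iff]
    exact ⟨((i : Int), degs[i]), ⟨⟨i, h, by simp⟩, by simp [hd]⟩, by simp⟩

theorem pairwise_bucket (degs : List Int) (d : Int) : (bktB degs d).Pairwise (· < ·) := by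
  unfold bktB
  rw [List.pairwise_map]
  refine List.Pairwise.imp_of_mem ?_
    ((PySem.List.pairwise_lt_enumerate degs 0).sublist List.filter_sublist)
  intro p q hp hq hpq
  have h0p : 0 ≤ p.1 := by
    have := (PySem.List.mem_enumerate_iff degs 0 p).mp (List.mem_of_mem_filter hp)
    obtain ⟨k, _, rfl⟩ := this; simp
  have h0q : 0 ≤ q.1 := by
    have := (PySem.List.mem_enumerate_iff degs 0 q).mp (List.mem_of_mem_filter hq)
    obtain ⟨k, _, rfl⟩ := this; simp
  omega

theorem ordL_eq (l : List Char) :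
    ordL l = bktB (l.map pvDegB) 4 ++ bktB (l.map pvDegB) 3 ++ bktB (l.map pvDegB) 2 := by
  simp [ordL, pvOrder, bktB, List.flatMap_cons, List.flatMap_nil, List.append_assoc]

theorem val_of_mem_bucket (l : List Char) (d : Int) (i : Nat) (h : i ∈ bktB (l.map pvDegB) d) :
    i < l.length ∧ (dN (l.getD i ' ') : Int) = d := by
  obtain ⟨hl, hv⟩ := (mem_bucket _ d i).mp h
  have hlen : i < l.length := by simpa using hl
  refine ⟨hlen, ?_⟩
  rw [← hv, List.getElem_map, ← pvDegB_eq, List.getD_eq_getElem l ' ' hlen]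

theorem mem_ordL (l : List Char) (i : Nat) :
    i ∈ ordL l ↔ i < l.length ∧ 2 ≤ dN (l.getD i ' ') := by
  rw [ordL_eq]
  simp only [List.mem_append]
  constructor
  · rintro ((h | h) | h) <;>
      (obtain ⟨hlen, hv⟩ := val_of_mem_bucket l _ i h; exact ⟨hlen, by omega⟩)
  · rintro ⟨hlen, h2⟩
    have h4 := dN_le4 (l.getD i ' ')
    have hi' : i < (l.map pvDegB).length := by simpa using hlen
    have hval : ∀ d : Int, (dN (l.getD i ' ') : Int) = d → (l.map pvDegB)[i] = d := by
      intro d hd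
      rw [List.getD_eq_getElem l ' ' hlen] at hd
      rw [List.getElem_map, pvDegB_eq]
      exact hd
    have : dN (l.getD i ' ') = 2 ∨ dN (l.getD i ' ') = 3 ∨ dN (l.getD i ' ') = 4 := by omega
    rcases this with h|h|h
    · exact Or.inr ((mem_bucket _ _ i).mpr ⟨hi', hval 2 (by rw [h]; norm_num)⟩)
    · exact Or.inl (Or.inr ((mem_bucket _ _ i).mpr ⟨hi', hval 3 (by rw [h]; norm_num)⟩))
    · exact Or.inl (Or.inl ((mem_bucket _ _ i).mpr ⟨hi', hval 4 (by rw [h]; norm_num)⟩))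

theorem pairwise_bkt_rel (l : List Char) (d : Int) :
    (bktB (l.map pvDegB) d).Pairwise (fun a b =>
      dN (l.getD b ' ') < dN (l.getD a ' ') ∨ (dN (l.getD a ' ') = dN (l.getD b ' ') ∧ a < b)) := by
  refine List.Pairwise.imp_of_mem ?_ (pairwise_bucket (l.map pvDegB) d)
  intro a b ha hb hab
  have hva := (val_of_mem_bucket l d a ha).2
  have hvb := (val_of_mem_bucket l d b hb).2
  exact Or.inr ⟨by omega, hab⟩

theorem cross_bkt_rel (l : List Char) (d d' : Int) (hdd : d' < d) :
    ∀ a ∈ bktB (l.map pvDegB) d, ∀ b ∈ bktB (l.map pvDegB) d',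
      dN (l.getD b ' ') < dN (l.getD a ' ') ∨ (dN (l.getD a ' ') = dN (l.getD b ' ') ∧ a < b) := by
  intro a ha b hb
  have hva := (val_of_mem_bucket l d a ha).2
  have hvb := (val_of_mem_bucket l d' b hb).2
  exact Or.inl (by omega)

theorem pairwise_ordL (l : List Char) :
    (ordL l).Pairwise (fun a b =>
      dN (l.getD b ' ') < dN (l.getD a ' ') ∨ (dN (l.getD a ' ') = dN (l.getD b ' ') ∧ a < b)) := by
  rw [ordL_eq, List.pairwise_append, List.pairwise_append]
  refine ⟨⟨pairwise_bkt_rel l 4, pairwise_bkt_rel l 3, cross_bkt_rel l 4 3 (by norm_num)⟩,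
          pairwise_bkt_rel l 2, ?_⟩
  intro a ha b hb
  rcases List.mem_append.mp ha with h | h
  · exact cross_bkt_rel l 4 2 (by norm_num) a h b hb
  · exact cross_bkt_rel l 3 2 (by norm_num) a h b hb

theorem nodup_ordL (l : List Char) : (ordL l).Nodup := by
  refine List.Pairwise.imp ?_ (pairwise_ordL l)
  rintro a b (h | ⟨_, h⟩) <;> (rintro rfl; omega)

theorem length_ordL_le (l : List Char) : (ordL l).length ≤ l.length := by
  have hnd := nodup_ordL l
  have hsub : (ordL l).toFinset ⊆ Finset.range l.length := by
    intro i hi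
    rw [List.mem_toFinset] at hi
    exact Finset.mem_range.mpr ((mem_ordL l i).mp hi).1
  calc (ordL l).length = (ordL l).toFinset.card := (List.toFinset_card_of_nodup hnd).symm
    _ ≤ (Finset.range l.length).card := Finset.card_le_card hsub
    _ = l.length := Finset.card_range _

theorem amax_inv (κ : Nat → Int) (n : Nat) (hn : 0 < n) :
    amax κ n < n ∧ (∀ i < n, κ i ≤ κ (amax κ n)) ∧ (∀ i < amax κ n, κ i < κ (amax κ n)) := by
  induction n with
  | zero => omega
  | succ m ih =>
    by_cases hm : 0 < m
    · obtain ⟨h1, h2, h3⟩ := ih hm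
      have hstep : amax κ (m + 1) = if κ (amax κ m) < κ m then m else amax κ m := by
        unfold amax
        rw [List.range_succ, List.foldl_append, List.foldl_cons, List.foldl_nil]
      by_cases hlt : κ (amax κ m) < κ m
      · rw [hstep, if_pos hlt]
        refine ⟨by omega, ?_, ?_⟩
        · intro i hi
          rcases Nat.lt_succ_iff_lt_or_eq.mp hi with h | rfl
          · exact le_trans (h2 i h) (le_of_lt hlt)
          · exact le_refl _
        · intro i hi
          exact lt_of_le_of_lt (h2 i (by omega)) hlt
      · rw [hstep, if_neg hlt]
        refine ⟨by omega, ?_, h3⟩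
        intro i hi
        rcases Nat.lt_succ_iff_lt_or_eq.mp hi with h | rfl
        · exact h2 i h
        · omega
    · have hm0 : m = 0 := by omega
      subst hm0
      have : amax κ 1 = 0 := by
        unfold amax
        simp
      rw [this]
      exact ⟨by omega, by intro i hi; interval_cases i; exact le_refl _, by omega⟩

theorem argmax_fold (κ : Nat → Int) (n j : Nat) (hj : j < n)
    (hmax : ∀ i < n, κ i ≤ κ j) (hfirst : ∀ i < j, κ i < κ j) :
    amax κ n = j := by
  obtain ⟨h1, h2, h3⟩ := amax_inv κ n (by omega)
  rcases Nat.lt_trichotomy (amax κ n) j with h | h | h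
  · have := hfirst _ h
    have := h2 j hj
    omega
  · exact h
  · have := h3 j h
    have := hmax _ h1
    omega

theorem prodN_eq_one (res : List Char) (h : ∀ c ∈ res, dN c = 1) : prodN res = 1 := by
  unfold prodN
  refine List.prod_eq_one ?_
  intro x hx
  obtain ⟨c, hc, rfl⟩ := List.mem_map.mp hx
  exact h c hc

theorem resk_succ (l : List Char) (k : Nat) (hk : k < (ordL l).length) :
    applyRep l ((ordL l).take (k + 1)) =
      (applyRep l ((ordL l).take k)).set ((ordL l)[k]) (pvRepB (l.getD ((ordL l)[k]) ' ')) := by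
  unfold applyRep
  simp only [List.take_add_one, List.getElem?_eq_getElem hk, Option.toList_some,
    List.foldl_append, List.foldl_cons, List.foldl_nil]

theorem nodup_take_ordL (l : List Char) (k : Nat) : ((ordL l).take k).Nodup :=
  (List.take_sublist k _).nodup (nodup_ordL l)

theorem getElem_not_mem_take (l : List Char) (k : Nat) (hk : k < (ordL l).length) :
    (ordL l)[k] ∉ (ordL l).take k := by
  intro hmem
  obtain ⟨b, hb, hbe⟩ := List.getElem_of_mem hmem
  have hb' : b < k := by
    rw [List.length_take] at hb
    omega
  rw [List.getElem_take] at hbe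
  exact absurd ((nodup_ordL l).getElem_inj_iff.mp hbe) (by omega)

theorem val_resk (l : List Char) (k : Nat) (i : Nat) (hi : i < l.length) :
    (applyRep l ((ordL l).take k)).getD i ' ' =
      if i ∈ (ordL l).take k then pvRepB (l.getD i ' ') else l.getD i ' ' :=
  getD_applyRep l _ (nodup_take_ordL l k) i hi

theorem mem_take_of_getElem_lt (l : List Char) (b k : Nat) (hb : b < (ordL l).length)
    (hbk : b < k) : (ordL l)[b] ∈ (ordL l).take k := by
  have hlen : b < ((ordL l).take k).length := by
    rw [List.length_take]
    omega
  have : ((ordL l).take k)[b] = (ordL l)[b] := List.getElem_take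
  rw [← this]
  exact List.getElem_mem hlen

-- the comparison facts needed for the argmax: position ord[k] holds the maximum value of the
-- current list, and strictly exceeds every earlier position
theorem resk_val_cmp (l : List Char) (k : Nat) (hk : k < (ordL l).length) (i : Nat)
    (hi : i < l.length) :
    dN ((applyRep l ((ordL l).take k)).getD i ' ') ≤
      dN ((applyRep l ((ordL l).take k)).getD ((ordL l)[k]) ' ') ∧
    (i < (ordL l)[k] →
      dN ((applyRep l ((ordL l).take k)).getD i ' ') <
        dN ((applyRep l ((ordL l).take k)).getD ((ordL l)[k]) ' ')) := by
  have hmem : (ordL l)[k] ∈ ordL l := List.getElem_mem hk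
  obtain ⟨hjlen, hj2⟩ := (mem_ordL l _).mp hmem
  have hvj : (applyRep l ((ordL l).take k)).getD ((ordL l)[k]) ' ' = l.getD ((ordL l)[k]) ' ' := by
    rw [val_resk l k _ hjlen, if_neg (getElem_not_mem_take l k hk)]
  rw [hvj]
  rw [val_resk l k i hi]
  by_cases hmemt : i ∈ (ordL l).take k
  · rw [if_pos hmemt]
    have hio : i ∈ ordL l := List.mem_of_mem_take hmemt
    have h2i := ((mem_ordL l i).mp hio).2
    rw [dN_rep _ h2i]
    exact ⟨by omega, fun _ => by omega⟩
  · rw [if_neg hmemt]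
    by_cases hio : i ∈ ordL l
    · obtain ⟨b, hb, hbe⟩ := List.getElem_of_mem hio
      rcases Nat.lt_trichotomy b k with hbk | rfl | hbk
      · exact absurd (hbe ▸ mem_take_of_getElem_lt l b k hb hbk) hmemt
      · rw [hbe]
        exact ⟨le_refl _, fun h => absurd h (lt_irrefl i)⟩
      · have hrel := List.pairwise_iff_getElem.mp (pairwise_ordL l) k b hk hb hbk
        rw [hbe] at hrel
        rcases hrel with h | ⟨h, hlt⟩
        · exact ⟨le_of_lt h, fun _ => h⟩
        · exact ⟨le_of_eq h.symm, fun hij => absurd hij (by omega)⟩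
    · have hno : ¬(i < l.length ∧ 2 ≤ dN (l.getD i ' ')) := fun h => hio ((mem_ordL l i).mpr h)
      have h1 := dN_pos (l.getD i ' ')
      have : dN (l.getD i ' ') = 1 := by omega
      rw [this]
      exact ⟨by omega, fun _ => by omega⟩

theorem prod_step (l : List Char) (k : Nat) (hk : k < (ordL l).length) :
    prodN (applyRep l ((ordL l).take k)) =
      dN (l.getD ((ordL l)[k]) ' ') * prodN (applyRep l ((ordL l).take (k + 1))) := by
  have hmem : (ordL l)[k] ∈ ordL l := List.getElem_mem hk
  obtain ⟨hjlen, hj2⟩ := (mem_ordL l _).mp hmem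
  have hlen := length_applyRep l ((ordL l).take k)
  have hval : (applyRep l ((ordL l).take k)).getD ((ordL l)[k]) ' ' = l.getD ((ordL l)[k]) ' ' := by
    rw [val_resk l k _ hjlen, if_neg (getElem_not_mem_take l k hk)]
  have hjL : (ordL l)[k] < ((applyRep l ((ordL l).take k)).map dN).length := by
    rw [List.length_map, hlen]
    exact hjlen
  have hjR : (ordL l)[k] < (applyRep l ((ordL l).take k)).length := by
    rw [hlen]; exact hjlen
  have hgetL : ((applyRep l ((ordL l).take k)).map dN)[(ordL l)[k]]'hjL
      = dN (l.getD ((ordL l)[k]) ' ') := by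
    rw [List.getElem_map, ← List.getD_eq_getElem _ ' ' hjR, hval]
  unfold prodN
  rw [resk_succ l k hk, List.map_set, dN_rep _ hj2, List.prod_set, if_pos hjL]
  conv_lhs => rw [← List.prod_take_mul_prod_drop ((applyRep l ((ordL l).take k)).map dN) ((ordL l)[k])]
  rw [List.drop_eq_getElem_cons hjL, List.prod_cons, hgetL]
  ring

theorem prod_last (l : List Char) :
    prodN (applyRep l ((ordL l).take (ordL l).length)) = 1 := by
  rw [List.take_length]
  apply prodN_eq_one
  intro c hc
  obtain ⟨i, hi, rfl⟩ := List.getElem_of_mem hc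
  have hi' : i < l.length := by
    rw [length_applyRep] at hi
    exact hi
  rw [← List.getD_eq_getElem _ ' ' hi,
      getD_applyRep l (ordL l) (nodup_ordL l) i hi']
  by_cases hmem : i ∈ ordL l
  · rw [if_pos hmem]
    exact dN_rep _ ((mem_ordL l i).mp hmem).2
  · rw [if_neg hmem]
    have hno : ¬(i < l.length ∧ 2 ≤ dN (l.getD i ' ')) := fun h => hmem ((mem_ordL l i).mpr h)
    have h1 := dN_pos (l.getD i ' ')
    omega

theorem worst_resk (l : List Char) (k : Nat) (hk : k < (ordL l).length) :
    pvWorst (applyRep l ((ordL l).take k)) = some ((ordL l)[k]) := by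
  have hmem : (ordL l)[k] ∈ ordL l := List.getElem_mem hk
  obtain ⟨hjlen, hj2⟩ := (mem_ordL l _).mp hmem
  have hlen := length_applyRep l ((ordL l).take k)
  have hn : ¬ (applyRep l ((ordL l).take k)).length = 0 := by omega
  have heq : pvWorst (applyRep l ((ordL l).take k)) =
      if (applyRep l ((ordL l).take k)).length = 0 then none
      else some (amax (pvKeyAt (applyRep l ((ordL l).take k))) (applyRep l ((ordL l).take k)).length) := rfl
  rw [heq, if_neg hn, hlen]
  congr 1
  refine argmax_fold _ l.length ((ordL l)[k]) hjlen ?_ ?_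
  · intro i hi
    rw [pvKeyAt_eq, pvKeyAt_eq]
    exact_mod_cast (resk_val_cmp l k hk i hi).1
  · intro i hij
    rw [pvKeyAt_eq, pvKeyAt_eq]
    exact_mod_cast (resk_val_cmp l k hk i (by omega)).2 hij

theorem pvLoopA_succ (max_deg : Int) (fuel : Nat) (res : List Char) :
    pvLoopA max_deg (fuel + 1) res =
      if pvDegeneracy (String.ofList res) ≤ max_deg then res
      else
        match pvWorst res with
        | none => res
        | some idx =>
          pvLoopA max_deg fuel (res.set idx
            ((PySem.Dict.getD pvIupac (PySem.Str.upper (String.ofList [res.getD idx ' ']))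
              (String.ofList [res.getD idx ' '])).toList.headD (res.getD idx ' '))) := rfl

theorem prodN_resk (l : List Char) :
    ∀ d k, k ≤ (ordL l).length → (ordL l).length - k = d →
      prodN (applyRep l ((ordL l).take k)) = sfxProd l ((ordL l).drop k) := by
  intro d
  induction d with
  | zero =>
    intro k hk hd
    have hk' : k = (ordL l).length := by omega
    subst hk'
    rw [List.drop_length, prod_last l]
    rfl
  | succ d ih =>
    intro k hk hd
    have hklt : k < (ordL l).length := by omega
    rw [List.drop_eq_getElem_cons hklt]
    have : (sfxProd l ((ordL l)[k] :: (ordL l).drop (k + 1)) : Int)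
        = (dN (l.getD ((ordL l)[k]) ' ') : Int) * (sfxProd l ((ordL l).drop (k + 1)) : Int) :=
      sfxProd_cons l _ _
    have hgoal : prodN (applyRep l ((ordL l).take k))
        = dN (l.getD ((ordL l)[k]) ' ') * sfxProd l ((ordL l).drop (k + 1)) := by
      rw [prod_step l k hklt, ih (k + 1) (by omega) (by omega)]
    rw [hgoal]
    exact_mod_cast this.symm

theorem mem_drop_lt (l : List Char) (k : Nat) :
    ∀ i ∈ (ordL l).drop k, i < l.length := fun i hi =>
  ((mem_ordL l i).mp (List.mem_of_mem_drop hi)).1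

theorem main_loop (l : List Char) (max_deg : Int) (hcap : 1 ≤ max_deg) :
    ∀ fuel k, k ≤ (ordL l).length → (ordL l).length - k < fuel →
      pvLoopA max_deg fuel (applyRep l ((ordL l).take k)) =
        pvLoopB (l.map pvDegB) l max_deg ((ordL l).drop k)
          (pvSuffix (l.map pvDegB) (max max_deg 1 + 1) ((ordL l).drop k))
          (applyRep l ((ordL l).take k)) := by
  intro fuel
  induction fuel with
  | zero => intro k _ h; omega
  | succ fuel ih =>
    intro k hk hfuel
    have hb : (1 : Int) ≤ max max_deg 1 + 1 := by omega
    have hsfx : prodN (applyRep l ((ordL l).take k)) = sfxProd l ((ordL l).drop k) :=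
      prodN_resk l ((ordL l).length - k) k hk rfl
    by_cases hP : ((prodN (applyRep l ((ordL l).take k)) : Nat) : Int) ≤ max_deg
    · rw [pvLoopA_succ, pvDegeneracy_eq, if_pos hP]
      cases hdrop : (ordL l).drop k with
      | nil => rfl
      | cons j rest =>
        have hmem : ∀ i ∈ j :: rest, i < l.length := by
          rw [← hdrop]; exact mem_drop_lt l k
        have hX : min ((pvSuffix (l.map pvDegB) (max max_deg 1 + 1) rest).headD 1
              * (l.map pvDegB).getD j 1) (max max_deg 1 + 1)
            = min ((sfxProd l (j :: rest) : Nat) : Int) (max max_deg 1 + 1) := by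
          have h := head_pvSuffix l (max max_deg 1 + 1) hb (j :: rest) hmem
          rw [pvSuffix_cons, List.headD_cons] at h
          exact h
        rw [hdrop] at hsfx
        rw [pvSuffix_cons]
        simp only [pvLoopB]
        rw [hX, if_pos (by omega)]
    · have hklt : k < (ordL l).length := by
        rcases Nat.lt_or_ge k (ordL l).length with h | h
        · exact h
        · exfalso
          have hk' : k = (ordL l).length := by omega
          subst hk'
          rw [prod_last l] at hP
          simp only [Nat.cast_one] at hP
          omega
      have hj2 := ((mem_ordL l _).mp (List.getElem_mem hklt)).2
      have hjlen := ((mem_ordL l _).mp (List.getElem_mem hklt)).1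
      have hval : (applyRep l ((ordL l).take k)).getD ((ordL l)[k]) ' ' = l.getD ((ordL l)[k]) ' ' := by
        rw [val_resk l k _ hjlen, if_neg (getElem_not_mem_take l k hklt)]
      -- A side
      rw [pvLoopA_succ, pvDegeneracy_eq, if_neg hP, worst_resk l k hklt]
      have hsetA :
          (applyRep l ((ordL l).take k)).set ((ordL l)[k])
            ((PySem.Dict.getD pvIupac
              (PySem.Str.upper (String.ofList [(applyRep l ((ordL l).take k)).getD ((ordL l)[k]) ' ']))
              (String.ofList [(applyRep l ((ordL l).take k)).getD ((ordL l)[k]) ' '])).toList.headD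
                ((applyRep l ((ordL l).take k)).getD ((ordL l)[k]) ' '))
          = applyRep l ((ordL l).take (k + 1)) := by
        rw [hval, resk_succ l k hklt]
        rfl
      -- B side
      rw [List.drop_eq_getElem_cons hklt] at hsfx ⊢
      have hmem : ∀ i ∈ (ordL l)[k] :: (ordL l).drop (k + 1), i < l.length := by
        rw [← List.drop_eq_getElem_cons hklt]; exact mem_drop_lt l k
      have hX : min ((pvSuffix (l.map pvDegB) (max max_deg 1 + 1) ((ordL l).drop (k + 1))).headD 1
            * (l.map pvDegB).getD ((ordL l)[k]) 1) (max max_deg 1 + 1)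
          = min ((sfxProd l ((ordL l)[k] :: (ordL l).drop (k + 1)) : Nat) : Int) (max max_deg 1 + 1) := by
        have h := head_pvSuffix l (max max_deg 1 + 1) hb ((ordL l)[k] :: (ordL l).drop (k + 1)) hmem
        rw [pvSuffix_cons, List.headD_cons] at h
        exact h
      rw [pvSuffix_cons]
      simp only [pvLoopB]
      rw [hX, if_neg (by omega)]
      have hsetB : (applyRep l ((ordL l).take k)).set ((ordL l)[k]) (pvRepB (l.getD ((ordL l)[k]) ' '))
          = applyRep l ((ordL l).take (k + 1)) := (resk_succ l k hklt).symm
      rw [hsetA, hsetB]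
      exact ih (k + 1) (by omega) (by omega)

-- ===== VERDICT (by name: the statement is the Claim_ definition above) =====
theorem cap_degeneracy_py_spec : Claim_equal_cap_degeneracy_py := by
  intro seq max_deg hdom hpre
  have hcap : (1 : Int) ≤ max_deg := hpre
  unfold Spec_cap_degeneracy_py
  show (if pvDegeneracy seq ≤ max_deg then seq
        else String.ofList (pvLoopA max_deg (seq.toList.length + 1) seq.toList)) =
       (if (seq.toList.map pvDegB).foldl (fun t d => min (t * d) (max max_deg 1 + 1)) 1 ≤ max_deg then seq
        else String.ofList (pvLoopB (seq.toList.map pvDegB) seq.toList max_deg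
          (pvOrder (seq.toList.map pvDegB))
          (pvSuffix (seq.toList.map pvDegB) (max max_deg 1 + 1) (pvOrder (seq.toList.map pvDegB)))
          seq.toList))
  have hdeg : pvDegeneracy seq = ((prodN seq.toList : Nat) : Int) := by
    conv_lhs => rw [← String.ofList_toList (s := seq)]
    exact pvDegeneracy_eq _
  rw [hdeg, clamp_total_eq seq.toList (max max_deg 1 + 1) (by omega)]
  rw [if_congr (show min ((prodN seq.toList : Nat) : Int) (max max_deg 1 + 1) ≤ max_deg
        ↔ ((prodN seq.toList : Nat) : Int) ≤ max_deg by omega) rfl rfl]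
  by_cases hc : ((prodN seq.toList : Nat) : Int) ≤ max_deg
  · rw [if_pos hc, if_pos hc]
  · rw [if_neg hc, if_neg hc]
    congr 1
    have hml := main_loop seq.toList max_deg hcap (seq.toList.length + 1) 0 (by omega)
      (by have := length_ordL_le seq.toList; omega)
    have h0 : applyRep seq.toList ((ordL seq.toList).take 0) = seq.toList := rfl
    rw [h0, List.drop_zero] at hml
    exact hml
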